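-- pv_equiv track=rewrite | github.com/SophonAlpha/codewars | solutions/small_nonogram_solver.py | get_first_zero_bit
-- ===== SOURCE A (Python) =====
-- def get_first_zero_bit(value, max_len):
--     bit_pos = None
--     for pos in range(max_len):
--         mask = 1 << pos
--         if value & mask == 0:
--             bit_pos = pos
--             break
--     return bit_pos
-- ===== SOURCE B (Python) =====
-- def get_first_zero_bit(value, max_len):
--     if max_len <= 0:
--         return None
--     inverted = ~value & ((1 << max_len) - 1)
--     if inverted == 0:
--         return None
--     return (inverted & -inverted).bit_length() - 1
-- ===== Notes on version B (the rewrite author's own statement) =====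
-- stated objective: faster
-- what changed: Replaced the position-by-position scan for the first zero bit by a closed-form bit computation: mask the complement to max_len bits, isolate the lowest set bit with x & -x, and read its position off bit_length.
import Mathlib
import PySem

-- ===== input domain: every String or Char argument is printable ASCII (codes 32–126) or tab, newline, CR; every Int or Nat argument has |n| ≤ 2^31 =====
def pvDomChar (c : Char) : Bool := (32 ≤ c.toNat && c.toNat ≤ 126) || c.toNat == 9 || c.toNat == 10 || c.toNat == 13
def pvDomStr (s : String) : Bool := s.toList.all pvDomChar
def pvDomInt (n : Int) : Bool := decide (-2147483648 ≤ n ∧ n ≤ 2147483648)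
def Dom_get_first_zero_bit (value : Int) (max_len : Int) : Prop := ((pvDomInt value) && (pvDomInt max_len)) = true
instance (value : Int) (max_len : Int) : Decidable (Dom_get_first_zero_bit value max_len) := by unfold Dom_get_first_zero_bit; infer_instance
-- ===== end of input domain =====

-- B replaces A's position-by-position scan by a closed-form bit computation (mask the
-- complement, isolate the lowest set bit, read its position off bit_length): same value
-- everywhere, O(1) big-int operations instead of O(max_len) loop iterations.

-- ===== PORT A =====
-- 'for pos in range(max_len): mask = 1 << pos; if value & mask == 0: break' as the obvious
-- structural recursion on the remaining iteration count, pos counting up from 0.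
def get_first_zero_bit_loop (value : Int) (pos : Nat) (fuel : Nat) : Option Int :=
  match fuel with
  | 0 => none
  | f + 1 =>
    let mask : Int := (1 : Int) <<< pos
    if PySem.Int.band value mask = 0 then some (pos : Int)
    else get_first_zero_bit_loop value (pos + 1) f

def get_first_zero_bit (value : Int) (max_len : Int) : Option Int :=
  get_first_zero_bit_loop value 0 max_len.toNat

-- ===== PORT B =====
-- transliteration of Source B; '1 << max_len' is '(1 : Int) <<< max_len.toNat' (exact: the
-- guard ensures max_len > 0), '~value' is Int.not, '&' is PySem.Int.band,
-- '.bit_length()' is PySem.Int.bitLength.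
def get_first_zero_bit_alt (value : Int) (max_len : Int) : Option Int :=
  if max_len ≤ 0 then none
  else
    let inverted : Int := PySem.Int.band (Int.not value) (((1 : Int) <<< max_len.toNat) - 1)
    if inverted = 0 then none
    else some ((PySem.Int.bitLength (PySem.Int.band inverted (-inverted)) : Int) - 1)

-- ===== PRECONDITION & SPEC =====
def Spec_get_first_zero_bit (value : Int) (max_len : Int) (out : Option Int) : Prop := out = get_first_zero_bit_alt value max_len
instance (value : Int) (max_len : Int) (out : Option Int) : Decidable (Spec_get_first_zero_bit value max_len out) := by unfold Spec_get_first_zero_bit; infer_instance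

-- ===== CLAIM (what is proved, stated in full; the proofs are below) =====
def Claim_equal_get_first_zero_bit : Prop := ∀ (value : Int) (max_len : Int), Dom_get_first_zero_bit value max_len → Spec_get_first_zero_bit value max_len (get_first_zero_bit value max_len)

-- ===== LEMMAS AND PROOFS =====

theorem pv_not_eq (v : Int) : Int.not v = -v - 1 := by
  cases v with
  | ofNat n => simp [Int.not, Int.negSucc_eq]; omega
  | negSucc n => simp [Int.not, Int.negSucc_eq]

-- (n.testBit p) as arithmetic
theorem pv_toNat_testBit (n p : Nat) : (n.testBit p).toNat = n / 2 ^ p % 2 := by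
  induction p generalizing n with
  | zero =>
    rw [Nat.testBit_zero]
    rcases Nat.mod_two_eq_zero_or_one n with h | h <;> simp [h]
  | succ p ih =>
    rw [Nat.testBit_succ, ih]
    rw [Nat.div_div_eq_div_mul]
    ring_nf

-- Euclidean decomposition of -W-1 by a positive divisor
theorem pv_neg_ediv (W c : Int) (_hW : 0 ≤ W) (hc : 0 < c) :
    (-W - 1) / c = -(W / c) - 1 ∧ (-W - 1) % c = c - 1 - W % c := by
  have h := (Int.ediv_emod_unique (a := -W - 1) (b := c)
    (q := -(W / c) - 1) (r := c - 1 - W % c) hc).mpr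
  have hWm : W % c + c * (W / c) = W := Int.emod_add_ediv W c
  have h1 : 0 ≤ W % c := Int.emod_nonneg W (by omega)
  have h2 : W % c < c := Int.emod_lt_of_pos W hc
  have := h ⟨by nlinarith [hWm], by omega, by omega⟩
  exact ⟨this.1, this.2⟩

theorem pv_shl_eq (p : Nat) : (1 : Int) <<< p = ((2 ^ p : Nat) : Int) := by
  rw [Int.shiftLeft_eq]; push_cast; ring

theorem pv_shl_toNat (p : Nat) : ((1 : Int) <<< p).toNat = 2 ^ p := by
  rw [pv_shl_eq, Int.toNat_natCast]

theorem pv_loop_succ (v : Int) (p f : Nat) :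
    get_first_zero_bit_loop v p (f + 1) =
      if PySem.Int.band v ((1 : Int) <<< p) = 0 then some (p : Int)
      else get_first_zero_bit_loop v (p + 1) f := rfl

-- value & (1 << p) arithmetically, for any sign of v
theorem pv_band_pow (v : Int) (p : Nat) :
    PySem.Int.band v ((1 : Int) <<< p) = v / 2 ^ p % 2 * 2 ^ p := by
  have hshl : (0 : Int) ≤ (1 : Int) <<< p := by rw [pv_shl_eq]; positivity
  by_cases hv : 0 ≤ v
  · obtain ⟨n, rfl⟩ := Int.eq_ofNat_of_zero_le hv
    rw [pv_shl_eq, PySem.Int.band]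
    simp only [if_pos hv, if_pos (by positivity : (0:Int) ≤ ((2^p : Nat) : Int))]
    rw [Int.toNat_natCast, Int.toNat_natCast, Nat.and_two_pow, pv_toNat_testBit]
    push_cast
    ring
  · -- v < 0 : band = 2^p - (w & 2^p) with w = -v-1 ≥ 0
    obtain ⟨w, hw⟩ : ∃ w : Nat, v = -(w : Int) - 1 := by
      refine ⟨(-v - 1).toNat, ?_⟩
      have : (0:Int) ≤ -v - 1 := by omega
      omega
    subst hw
    rw [PySem.Int.band]
    simp only [if_neg hv, if_pos hshl]
    have hmv : (-(-(w:Int) - 1) - 1).toNat = w := by omega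
    rw [hmv, pv_shl_toNat, Nat.land_comm, Nat.and_two_pow, pv_toNat_testBit]
    have hdm := pv_neg_ediv (w : Int) (2 ^ p) (by positivity) (by positivity)
    rw [hdm.1]
    have hcast : ((w : Int)) / 2 ^ p = ((w / 2 ^ p : Nat) : Int) := by push_cast; ring
    have h2 : w / 2 ^ p % 2 ≤ 1 := by omega
    have hmod : (-(((w / 2 ^ p : Nat) : Int)) - 1) % 2 = 1 - ((w / 2 ^ p % 2 : Nat) : Int) := by
      have := pv_neg_ediv ((w / 2 ^ p : Nat) : Int) 2 (by positivity) (by norm_num)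
      rw [this.2]; push_cast; omega
    rw [hcast, hmod]
    rcases (by omega : w / 2 ^ p % 2 = 0 ∨ w / 2 ^ p % 2 = 1) with ha | ha <;>
      rw [ha] <;> simp

-- ~value & ((1 << m) - 1)  =  (2^m - 1) - value % 2^m
theorem pv_band_inv (v : Int) (m : Nat) :
    PySem.Int.band (Int.not v) (((1 : Int) <<< m) - 1) = ((2 ^ m : Int) - 1) - v % 2 ^ m := by
  have hM : ((1 : Int) <<< m) - 1 = (((2 ^ m - 1 : Nat)) : Int) := by
    rw [pv_shl_eq]
    have : (1:Nat) ≤ 2 ^ m := Nat.one_le_two_pow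
    push_cast [Nat.cast_sub this]
    ring
  rw [pv_not_eq, hM]
  by_cases hv : 0 ≤ v
  · obtain ⟨n, rfl⟩ := Int.eq_ofNat_of_zero_le hv
    rw [PySem.Int.band]
    have hneg : ¬ (0 : Int) ≤ -(n : Int) - 1 - 0 := by omega
    simp only [if_neg (by omega : ¬ (0:Int) ≤ -(n:Int) - 1),
      if_pos (by positivity : (0:Int) ≤ ((2^m - 1 : Nat) : Int))]
    have h1 : (-(-(n:Int) - 1) - 1).toNat = n := by omega
    rw [h1, Int.toNat_natCast, Nat.land_comm, Nat.and_two_pow_sub_one_eq_mod]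
    have hle : n % 2 ^ m ≤ 2 ^ m - 1 := by
      have := Nat.mod_lt n (y := 2 ^ m) (by positivity); omega
    push_cast [Nat.cast_sub hle, Nat.cast_sub (Nat.one_le_two_pow)]
    ring
  · obtain ⟨w, hw⟩ : ∃ w : Nat, v = -(w : Int) - 1 := by
      refine ⟨(-v - 1).toNat, ?_⟩; omega
    subst hw
    rw [PySem.Int.band]
    simp only [if_pos (by omega : (0:Int) ≤ -(-(w:Int) - 1) - 1),
      if_pos (by positivity : (0:Int) ≤ ((2^m - 1 : Nat) : Int))]
    have h1 : (-(-(w:Int) - 1) - 1).toNat = w := by omega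
    rw [h1, Int.toNat_natCast, Nat.and_two_pow_sub_one_eq_mod]
    have hdm := pv_neg_ediv (w : Int) (2 ^ m) (by positivity) (by positivity)
    rw [hdm.2]
    have h1' : 0 ≤ (w:Int) % 2 ^ m := Int.emod_nonneg _ (by positivity)
    have hcast : ((w : Int)) % 2 ^ m = ((w % 2 ^ m : Nat) : Int) := by push_cast; ring
    omega

-- i & -i for i > 0, reduced to Nat
theorem pv_band_neg_self (i : Int) (hi : 0 < i) :
    PySem.Int.band i (-i) = ((i.toNat - (i.toNat &&& (i.toNat - 1)) : Nat) : Int) := by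
  rw [PySem.Int.band]
  simp only [if_pos (by omega : (0:Int) ≤ i), if_neg (by omega : ¬ (0:Int) ≤ -i)]
  have h1 : (-(-i) - 1).toNat = i.toNat - 1 := by omega
  rw [h1]

-- halving lemmas for Nat.land
theorem pv_land_odd_even (k : Nat) : (2 * k + 1) &&& (2 * k) = 2 * k := by
  apply Nat.eq_of_testBit_eq
  intro i
  cases i with
  | zero =>
    rw [Nat.testBit_land, Nat.testBit_zero]
    have ho : (2 * k + 1) % 2 = 1 := by omega
    have he : (2 * k) % 2 = 0 := by omega
    simp [ho, he]
  | succ i =>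
    rw [Nat.testBit_land]
    simp only [Nat.testBit_succ]
    have h1 : (2 * k + 1) / 2 = k := by omega
    have h2 : (2 * k) / 2 = k := by omega
    rw [h1, h2, Bool.and_self]

theorem pv_land_even_pred (M : Nat) (hM : 0 < M) :
    (2 * M) &&& (2 * M - 1) = 2 * (M &&& (M - 1)) := by
  apply Nat.eq_of_testBit_eq
  intro i
  cases i with
  | zero =>
    rw [Nat.testBit_land, Nat.testBit_zero]
    have he : (2 * M) % 2 = 0 := by omega
    have he2 : (2 * (M &&& (M - 1))) % 2 = 0 := by omega
    simp [he, he2]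
  | succ i =>
    rw [Nat.testBit_land]
    simp only [Nat.testBit_succ]
    have h1 : (2 * M) / 2 = M := by omega
    have h2 : (2 * M - 1) / 2 = M - 1 := by omega
    have h3 : (2 * (M &&& (M - 1))) / 2 = M &&& (M - 1) := by omega
    rw [h1, h2, h3, Nat.testBit_land]

-- the lowest set bit: N - (N &&& (N-1)) = 2^t where t is the lowest set bit of N
theorem pv_lowbit (N : Nat) (hN : 0 < N) :
    ∃ t, N - (N &&& (N - 1)) = 2 ^ t ∧ N.testBit t = true ∧
      (∀ p, p < t → N.testBit p = false) ∧ 2 ^ t ≤ N := by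
  induction N using Nat.strong_induction_on with
  | _ N ih =>
    rcases Nat.even_or_odd N with ⟨M, hM⟩ | ⟨k, hk⟩
    · -- N = 2M even, M > 0
      have hM2 : N = 2 * M := by omega
      have hMpos : 0 < M := by omega
      obtain ⟨t, h1, h2, h3, h4⟩ := ih M (by omega) hMpos
      refine ⟨t + 1, ?_, ?_, ?_, ?_⟩
      · rw [hM2, pv_land_even_pred M hMpos]
        have : M &&& (M - 1) ≤ M := Nat.and_le_left
        rw [pow_succ]
        omega
      · rw [hM2, Nat.testBit_succ]
        have : (2 * M) / 2 = M := by omega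
        rw [this]; exact h2
      · intro p hp
        cases p with
        | zero => rw [hM2, Nat.testBit_zero]; simp [Nat.mul_mod_right]
        | succ p =>
          rw [hM2, Nat.testBit_succ]
          have : (2 * M) / 2 = M := by omega
          rw [this]; exact h3 p (by omega)
      · rw [hM2, pow_succ]; omega
    · -- N odd
      have hk2 : N = 2 * k + 1 := by omega
      refine ⟨0, ?_, ?_, ?_, ?_⟩
      · rw [hk2]
        have : 2 * k + 1 - 1 = 2 * k := by omega
        rw [this, pv_land_odd_even]
        omega
      · rw [hk2, Nat.testBit_zero]; simp
      · intro p hp; omega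
      · omega

-- complement within m bits: bits of (2^m - 1 - R) are the flipped bits of R below m
theorem pv_comp_testBit (m : Nat) : ∀ (p R : Nat), R < 2 ^ m →
    ((2 ^ m - 1) - R).testBit p = (decide (p < m) && !R.testBit p) := by
  induction m with
  | zero =>
    intro p R hR
    have : R = 0 := by simpa using hR
    subst this
    simp
  | succ m ih =>
    intro p R hR
    have hc : 0 < 2 ^ m := by positivity
    have hR2 : R < 2 * 2 ^ m := by rw [pow_succ] at hR; omega
    have hXeq : (2 ^ (m + 1) - 1) - R = 2 * ((2 ^ m - 1) - R / 2) + (1 - R % 2) := by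
      rw [pow_succ]; omega
    cases p with
    | zero =>
      rw [Nat.testBit_zero, Nat.testBit_zero, hXeq]
      rcases Nat.mod_two_eq_zero_or_one R with h | h <;> simp [h]
    | succ p =>
      rw [Nat.testBit_succ, Nat.testBit_succ, hXeq]
      have hdiv : (2 * ((2 ^ m - 1) - R / 2) + (1 - R % 2)) / 2 = (2 ^ m - 1) - R / 2 := by
        omega
      rw [hdiv, ih p (R / 2) (by omega)]
      simp only [Nat.succ_lt_succ_iff]

-- bit k of v (k < m) read through R = (v % 2^m).toNat
theorem pv_bitv_bridge (v : Int) (m k : Nat) (hk : k < m) :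
    v / 2 ^ k % 2 = if (v % 2 ^ m).toNat.testBit k then 1 else 0 := by
  set R : Nat := (v % 2 ^ m).toNat with hRdef
  have hm0 : (0:Int) < 2 ^ m := by positivity
  have hRnn : (0:Int) ≤ v % 2 ^ m := Int.emod_nonneg v (by omega)
  have hRcast : ((R : Int)) = v % 2 ^ m := by rw [hRdef]; omega
  have hdecomp : v = (R : Int) + 2 ^ k * (2 ^ (m - k) * (v / 2 ^ m)) := by
    have h1 := Int.emod_add_ediv v (2 ^ m)
    have h2 : (2:Int) ^ k * 2 ^ (m - k) = 2 ^ m := by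
      rw [← pow_add]
      congr 1
      omega
    rw [hRcast, ← mul_assoc, h2]
    linarith [h1]
  have hk0 : ((2:Int) ^ k) ≠ 0 := by positivity
  have hstep : v / 2 ^ k = (R : Int) / 2 ^ k + 2 ^ (m - k) * (v / 2 ^ m) := by
    conv_lhs => rw [hdecomp]
    rw [Int.add_mul_ediv_left _ _ hk0]
  have heven : ∃ y : Int, 2 ^ (m - k) * (v / 2 ^ m) = 2 * y := by
    refine ⟨2 ^ (m - k - 1) * (v / 2 ^ m), ?_⟩
    have : (2:Int) ^ (m - k) = 2 * 2 ^ (m - k - 1) := by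
      rw [← pow_succ']
      congr 1
      omega
    rw [this]; ring
  obtain ⟨y, hy⟩ := heven
  have hcast : (R : Int) / 2 ^ k = ((R / 2 ^ k : Nat) : Int) := by push_cast; ring
  have htb := pv_toNat_testBit R k
  rw [hstep, hy, hcast]
  have hk2 : (0:Int) < 2 ^ k := by positivity
  cases hb : R.testBit k with
  | false =>
    have hh : R / 2 ^ k % 2 = 0 := by rw [hb] at htb; simpa using htb.symm
    simp only [Bool.false_eq_true, if_false]
    omega
  | true =>
    have hh : R / 2 ^ k % 2 = 1 := by rw [hb] at htb; simpa using htb.symm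
    rw [if_pos rfl]
    omega

theorem pv_bitLength_pow (t : Nat) : PySem.Int.bitLength (((2 ^ t : Nat)) : Int) = t + 1 := by
  induction t with
  | zero => decide
  | succ t ih =>
    rw [PySem.Int.bitLength_natCast (by positivity)]
    have : 2 ^ (t + 1) / 2 = 2 ^ t := by rw [pow_succ]; omega
    rw [this, ih]

-- the loop condition, arithmetically
theorem pv_loop_cond (v : Int) (p : Nat) :
    (PySem.Int.band v ((1 : Int) <<< p) = 0) ↔ v / 2 ^ p % 2 = 0 := by
  rw [pv_band_pow]
  have h : ((2:Int) ^ p) ≠ 0 := by positivity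
  constructor
  · intro hz
    rcases mul_eq_zero.mp hz with h1 | h1
    · exact h1
    · exact absurd h1 h
  · intro hz; rw [hz]; ring

-- the loop returns none iff every scanned bit is set
theorem pv_loop_none (v : Int) (f : Nat) : ∀ p : Nat,
    (∀ j, j < f → v / 2 ^ (p + j) % 2 ≠ 0) →
    get_first_zero_bit_loop v p f = none := by
  induction f with
  | zero => intro p _; rfl
  | succ f ih =>
    intro p h
    rw [pv_loop_succ, if_neg]
    · exact ih (p + 1) (fun j hj => by
        have := h (j + 1) (by omega)
        rwa [show p + 1 + j = p + (j + 1) by omega])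
    · rw [pv_loop_cond]
      have := h 0 (by omega)
      simpa using this

-- the loop finds the first zero bit
theorem pv_loop_some (v : Int) (f : Nat) : ∀ p j : Nat, j < f →
    v / 2 ^ (p + j) % 2 = 0 →
    (∀ j', j' < j → v / 2 ^ (p + j') % 2 ≠ 0) →
    get_first_zero_bit_loop v p f = some ((p + j : Nat) : Int) := by
  induction f with
  | zero => intro p j hj; omega
  | succ f ih =>
    intro p j hj hz hmin
    rw [pv_loop_succ]
    cases j with
    | zero =>
      rw [if_pos]
      · simp
      · rw [pv_loop_cond]; simpa using hz
    | succ j =>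
      rw [if_neg]
      · have := ih (p + 1) j (by omega)
          (by rwa [show p + 1 + j = p + (j + 1) by omega])
          (fun j' hj' => by
            have := hmin (j' + 1) (by omega)
            rwa [show p + 1 + j' = p + (j' + 1) by omega])
        rw [this]
        congr 1
        push_cast
        ring
      · rw [pv_loop_cond]
        have := hmin 0 (by omega)
        simpa using this

-- ===== VERDICT (by name: the statement is the Claim_ definition above) =====
theorem get_first_zero_bit_spec : Claim_equal_get_first_zero_bit := by
  intro value max_len _
  unfold Spec_get_first_zero_bit
  by_cases hml : max_len ≤ 0
  · have h0 : max_len.toNat = 0 := by omega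
    rw [get_first_zero_bit, get_first_zero_bit_alt, h0, if_pos hml]
    rfl
  · have hmlpos : 0 < max_len := by omega
    set m : Nat := max_len.toNat with hm
    have hmpos : 0 < m := by omega
    have hm0 : (0:Int) < 2 ^ m := by positivity
    set R : Nat := (value % 2 ^ m).toNat with hRdef
    have hRnn : (0:Int) ≤ value % 2 ^ m := Int.emod_nonneg value (by omega)
    have hRlt' : value % 2 ^ m < 2 ^ m := Int.emod_lt_of_pos value hm0
    have hRcast : ((R : Int)) = value % 2 ^ m := by rw [hRdef]; omega
    have hRlt : R < 2 ^ m := by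
      have : ((R : Int)) < ((2 ^ m : Nat) : Int) := by push_cast; omega
      exact_mod_cast this
    set N : Nat := 2 ^ m - 1 - R with hNdef
    have hNpow : (0:Nat) < 2 ^ m := by positivity
    have hinv : PySem.Int.band (Int.not value) (((1 : Int) <<< m) - 1) = ((N : Nat) : Int) := by
      rw [pv_band_inv]
      push_cast [hNdef, Nat.cast_sub (by omega : R ≤ 2 ^ m - 1), Nat.cast_sub Nat.one_le_two_pow]
      omega
    rw [get_first_zero_bit, get_first_zero_bit_alt, if_neg hml]
    simp only
    rw [hinv]
    by_cases hN : N = 0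
    · -- all low m bits of value are 1 : both sides give none
      rw [if_pos (by exact_mod_cast congrArg (Nat.cast : Nat → Int) hN)]
      apply pv_loop_none
      intro j hj
      rw [Nat.zero_add, pv_bitv_bridge value m j hj, ← hRdef]
      have hReq : R = 2 ^ m - 1 := by omega
      rw [hReq, Nat.testBit_two_pow_sub_one]
      have hjm : j < m := by omega
      simp [hjm]
    · have hNpos : 0 < N := by omega
      rw [if_neg (by exact_mod_cast hN)]
      obtain ⟨t, h1, h2, h3, h4⟩ := pv_lowbit N hNpos
      have htm : t < m := by
        have h2t : 2 ^ t < 2 ^ m := by omega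
        exact (Nat.pow_lt_pow_iff_right (by omega)).mp h2t
      have hlow : PySem.Int.band ((N : Nat) : Int) (-((N : Nat) : Int)) = ((2 ^ t : Nat) : Int) := by
        rw [pv_band_neg_self _ (by exact_mod_cast hNpos)]
        rw [Int.toNat_natCast, h1]
      rw [hlow, pv_bitLength_pow]
      have hA : get_first_zero_bit_loop value 0 m = some ((0 + t : Nat) : Int) := by
        apply pv_loop_some value m 0 t htm
        · rw [Nat.zero_add, pv_bitv_bridge value m t htm, ← hRdef]
          have hb := pv_comp_testBit m t R hRlt
          rw [← hNdef, h2] at hb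
          have : R.testBit t = false := by
            rcases hbt : R.testBit t with _ | _
            · rfl
            · rw [hbt] at hb; simp [htm] at hb
          simp [this]
        · intro j' hj'
          rw [Nat.zero_add, pv_bitv_bridge value m j' (by omega), ← hRdef]
          have hb := pv_comp_testBit m j' R hRlt
          rw [← hNdef, h3 j' hj'] at hb
          have : R.testBit j' = true := by
            rcases hbt : R.testBit j' with _ | _
            · rw [hbt] at hb; simp [show j' < m by omega] at hb
            · rfl
          simp [this]
      rw [hA]
      congr 1
      push_cast
      omega
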